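-- pv_equiv track=rewrite | github.com/test-Melodie/Projet | main.py | rechercheMin
-- ===== SOURCE A (Python) =====
-- def rechercheMin(dictionnaire):
--   """
--   Renvoie la valeur et la clé minimale
--   :param dictionnaire: où trouver le minimum
--   :type dictionnaire: la clé est juste renvoyée, la valeur est un nombre entier
--   :return: renvoie un Tuple d'abord la clé puis la valeur entière
--   """
--   minimum = None
--   min_cle = None
--   for cle, valeur in dictionnaire.items():
--     if minimum is None or valeur < minimum:
--       minimum = valeur
--       min_cle = cle
--   return (min_cle, minimum)
-- ===== SOURCE B (Python) =====
-- def rechercheMin(dictionnaire):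
--     if not dictionnaire:
--         return (None, None)
--     m = min(dictionnaire.values())
--     for cle, valeur in dictionnaire.items():
--         if valeur == m:
--             return (cle, m)
-- ===== Notes on version B (the rewrite author's own statement) =====
-- stated objective: alternative
-- what changed: Replaces A's single None-sentinel min-tracking pass by an empty-dict guard, a builtin min() over the values, and a first-match key lookup pass.
import Mathlib
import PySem

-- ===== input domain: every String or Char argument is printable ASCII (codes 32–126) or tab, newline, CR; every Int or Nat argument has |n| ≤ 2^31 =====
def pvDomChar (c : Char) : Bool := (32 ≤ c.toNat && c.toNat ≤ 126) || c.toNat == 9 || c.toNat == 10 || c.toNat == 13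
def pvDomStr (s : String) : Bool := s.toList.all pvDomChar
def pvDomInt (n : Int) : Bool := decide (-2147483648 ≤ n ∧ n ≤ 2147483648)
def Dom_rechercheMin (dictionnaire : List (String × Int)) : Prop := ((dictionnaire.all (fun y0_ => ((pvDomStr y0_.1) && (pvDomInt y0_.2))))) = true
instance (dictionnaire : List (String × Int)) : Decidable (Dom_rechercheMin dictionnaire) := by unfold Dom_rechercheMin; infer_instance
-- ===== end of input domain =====

-- B replaces A's single None-sentinel min-tracking loop by an empty guard, a min() over the values, and a first-match key lookup (alternative decomposition, same cost).


-- ===== PORT A =====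
def rechercheMinLoop : List (String × Int) → Option Int → Option String → Option String × Option Int
  | [], minimum, min_cle => (min_cle, minimum)
  | (cle, valeur) :: rest, minimum, min_cle =>
    if (match minimum with | none => true | some m => valeur < m) then
      rechercheMinLoop rest (some valeur) (some cle)
    else
      rechercheMinLoop rest minimum min_cle

def rechercheMin (dictionnaire : List (String × Int)) : Option String × Option Int :=
  rechercheMinLoop dictionnaire none none

-- ===== PORT B =====
def rechercheMin_alt (dictionnaire : List (String × Int)) : Option String × Option Int :=
  if dictionnaire.isEmpty then (none, none)
  else
    match (dictionnaire.map Prod.snd).min? with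
    | none => (none, none)
    | some m =>
      match dictionnaire.find? (fun kv => kv.2 == m) with
      | some kv => (some kv.1, some m)
      | none => (none, none)

-- ===== PRECONDITION & SPEC =====
def Spec_rechercheMin (dictionnaire : List (String × Int)) (out : Option String × Option Int) : Prop := out = rechercheMin_alt dictionnaire
instance (dictionnaire : List (String × Int)) (out : Option String × Option Int) : Decidable (Spec_rechercheMin dictionnaire out) := by unfold Spec_rechercheMin; infer_instance

-- ===== CLAIM (what is proved, stated in full; the proofs are below) =====
def Claim_equal_rechercheMin : Prop := ∀ (dictionnaire : List (String × Int)), Dom_rechercheMin dictionnaire → Spec_rechercheMin dictionnaire (rechercheMin dictionnaire)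

-- ===== LEMMAS AND PROOFS =====

theorem foldl_min_mem (l : List Int) (m : Int) :
    l.foldl min m = m ∨ l.foldl min m ∈ l := by
  induction l generalizing m with
  | nil => simp
  | cons v t ih =>
    simp only [List.foldl_cons]
    rcases ih (min m v) with h | h
    · rw [h]; rcases le_total m v with hle | hle
      · left; exact min_eq_left hle
      · right; rw [min_eq_right hle]; exact List.mem_cons_self
    · right; exact List.mem_cons_of_mem _ h

theorem foldl_min_le (l : List Int) (m : Int) : l.foldl min m ≤ m := by
  induction l generalizing m with
  | nil => simp
  | cons v t ih =>
    simp only [List.foldl_cons]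
    exact le_trans (ih (min m v)) (min_le_left _ _)

theorem rechercheMinLoop_some (t : List (String × Int)) (m : Int) (k : String) :
    rechercheMinLoop t (some m) (some k) =
      ((if (t.map Prod.snd).foldl min m = m then some k
        else match t.find? (fun kv => kv.2 == (t.map Prod.snd).foldl min m) with
          | some kv => some kv.1
          | none => some k),
       some ((t.map Prod.snd).foldl min m)) := by
  induction t generalizing m k with
  | nil => simp [rechercheMinLoop]
  | cons p t ih =>
    obtain ⟨k', v'⟩ := p
    simp only [rechercheMinLoop, List.map_cons, List.foldl_cons]
    by_cases hlt : v' < m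
    · rw [if_pos (by simp [hlt])]
      rw [min_eq_right (le_of_lt hlt)]
      rw [ih v' k']
      have hM : (t.map Prod.snd).foldl min v' ≤ v' := foldl_min_le _ _
      have hMm : (t.map Prod.snd).foldl min v' ≠ m := by omega
      by_cases hv : (t.map Prod.snd).foldl min v' = v'
      · simp [List.find?, hv]; omega
      · simp only [List.find?]
        have : ((v' : Int) == (t.map Prod.snd).foldl min v') = false := by
          simp; omega
        rw [this]
        simp only [if_neg hv, if_neg hMm]
        rcases foldl_min_mem (t.map Prod.snd) v' with h | h
        · exact absurd h hv
        · obtain ⟨kv, hkv, hsnd⟩ := List.mem_map.mp h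
          have hfind : (t.find? (fun kv => kv.2 == (t.map Prod.snd).foldl min v')).isSome := by
            rw [List.find?_isSome]
            exact ⟨kv, hkv, by simp [hsnd]⟩
          cases hf : t.find? (fun kv => kv.2 == (t.map Prod.snd).foldl min v') with
          | none => rw [hf] at hfind; simp at hfind
          | some kv' => simp
    · rw [if_neg (by simp [hlt])]
      have hge : m ≤ v' := by omega
      rw [min_eq_left hge]
      rw [ih m k]
      have hM : (t.map Prod.snd).foldl min m ≤ m := foldl_min_le _ _
      by_cases hm : (t.map Prod.snd).foldl min m = m
      · simp only [hm]
        by_cases hv : v' = m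
        · -- head matches too-check: find? on cons: v' == m true would pick head; but result is some k either way? no!
          simp [hv]
        · have : ((v' : Int) == m) = false := by simp [hv]
          simp [this]
      · simp only [if_neg hm]
        have : ((v' : Int) == (t.map Prod.snd).foldl min m) = false := by
          simp; omega
        simp [List.find?, this]

-- ===== VERDICT (by name: the statement is the Claim_ definition above) =====
theorem rechercheMin_spec : Claim_equal_rechercheMin := by
  unfold Claim_equal_rechercheMin Spec_rechercheMin
  intro d _
  cases d with
  | nil => rfl
  | cons p t =>
    obtain ⟨k, v⟩ := p
    show rechercheMinLoop ((k, v) :: t) none none = _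
    simp only [rechercheMinLoop]
    rw [rechercheMinLoop_some]
    simp only [rechercheMin_alt, List.isEmpty_cons, List.map_cons, List.min?]
    by_cases hv : (t.map Prod.snd).foldl min v = v
    · simp [List.find?, hv]
    · have hbf : ((v : Int) == (t.map Prod.snd).foldl min v) = false := by
        simp; exact fun h => hv h.symm
      simp only [List.find?, hbf, if_neg hv]
      rcases foldl_min_mem (t.map Prod.snd) v with h | h
      · exact absurd h hv
      · obtain ⟨kv, hkv, hsnd⟩ := List.mem_map.mp h
        have hfind : (t.find? (fun kv => kv.2 == (t.map Prod.snd).foldl min v)).isSome := by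
          rw [List.find?_isSome]
          exact ⟨kv, hkv, by simp [hsnd]⟩
        cases hf : t.find? (fun kv => kv.2 == (t.map Prod.snd).foldl min v) with
        | none => rw [hf] at hfind; simp at hfind
        | some kv' => simp
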